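-- pv_equiv track=rewrite | github.com/AlfandaviAU/KriptoWithTanur | Tucil 1 - Kripto/classiccipher.py | matrix3Inv
-- ===== SOURCE A (Python) =====
-- z26Inverse = [
--     1, None, 9, None, 21,
--     None, 15, None, 3, None,
--     19, None, None, None, 7,
--     None, 23, None, 11, None,
--     5, None, 17, None, 25,
--     None
--     ]
--
-- def matrix3Inv(mtx : "3x3 int matrix") -> "3x3 int matrix":
--     A = mtx[1][1] * mtx[2][2] - mtx[2][1] * mtx[1][2]
--     B = -(mtx[1][0] * mtx[2][2] - mtx[1][2] * mtx[2][0])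
--     C = mtx[1][0] * mtx[2][1] - mtx[1][1] * mtx[2][0]
--     D = -(mtx[0][1] * mtx[2][2] - mtx[2][1] * mtx[0][2])
--     E = mtx[0][0] * mtx[2][2] - mtx[0][2] * mtx[2][0]
--     F = -(mtx[0][0] * mtx[2][1] - mtx[0][1] * mtx[2][0])
--     G = mtx[0][1] * mtx[1][2] - mtx[1][1] * mtx[0][2]
--     H = -(mtx[0][0] * mtx[1][2] - mtx[0][2] * mtx[1][0])
--     I = mtx[0][0] * mtx[1][1] - mtx[0][1] * mtx[1][0]
--     det       = (A*mtx[0][0] + B*mtx[0][1] + C*mtx[0][2]) % 26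
--     detrepM26 = z26Inverse[det-1]
--
--     inv = [
--         [A, D, G],
--         [B, E, H],
--         [C, F, I],
--         ]
--
--     for i in range(3):
--         for j in range(3):
--             inv[i][j] = (inv[i][j] * detrepM26) % 26
--
--     return inv
-- ===== SOURCE B (Python) =====
-- z26Inverse = [
--     1, None, 9, None, 21,
--     None, 15, None, 3, None,
--     19, None, None, None, 7,
--     None, 23, None, 11, None,
--     5, None, 17, None, 25,
--     None
--     ]
--
-- def matrix3Inv(mtx):
--     # Cayley-Hamilton: adj(M) = M^2 - tr(M)*M + e2*I, with
--     # e2 = (tr(M)^2 - tr(M^2)) // 2 (always even), and det = row0(M) . col0(adj).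
--     M = [[mtx[i][j] for j in range(3)] for i in range(3)]
--     M2 = [[sum(M[i][k] * M[k][j] for k in range(3)) for j in range(3)]
--           for i in range(3)]
--     t = M[0][0] + M[1][1] + M[2][2]
--     t2 = M2[0][0] + M2[1][1] + M2[2][2]
--     e2 = (t * t - t2) // 2
--     adj = [[M2[i][j] - t * M[i][j] + (e2 if i == j else 0) for j in range(3)]
--            for i in range(3)]
--     det = sum(M[0][j] * adj[j][0] for j in range(3)) % 26
--     d = z26Inverse[det - 1]
--     return [[(adj[i][j] * d) % 26 for j in range(3)] for i in range(3)]
-- ===== Notes on version B (the rewrite author's own statement) =====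
-- stated objective: alternative
-- what changed: Replaces A's nine hardcoded cofactor/minor expressions by the Cayley-Hamilton identity: the adjugate is computed as M^2 - tr(M)*M + e2*I with e2 = (tr(M)^2 - tr(M^2))//2 via one matrix squaring and traces (no minors at all); det is recovered as row0(M).col0(adj); the z26Inverse table lookup and final mod-26 scaling are kept.
import Mathlib
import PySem

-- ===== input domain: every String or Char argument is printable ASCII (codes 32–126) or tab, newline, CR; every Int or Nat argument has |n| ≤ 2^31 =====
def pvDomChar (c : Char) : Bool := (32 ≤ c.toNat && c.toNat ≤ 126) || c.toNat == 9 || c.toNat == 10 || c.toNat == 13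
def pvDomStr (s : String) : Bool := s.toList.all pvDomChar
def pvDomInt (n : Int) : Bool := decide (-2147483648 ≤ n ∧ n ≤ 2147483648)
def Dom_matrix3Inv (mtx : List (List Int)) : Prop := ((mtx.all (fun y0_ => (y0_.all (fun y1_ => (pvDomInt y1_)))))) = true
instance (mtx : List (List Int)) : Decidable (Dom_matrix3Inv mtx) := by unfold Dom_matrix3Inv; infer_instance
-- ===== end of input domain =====

-- B computes the adjugate by the Cayley-Hamilton identity (matrix squaring and traces)
-- instead of A's nine hardcoded cofactor expressions; same table lookup and mod-26 scaling.

-- the module constant z26Inverse (None → none)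
def z26Inverse : List (Option Int) :=
  [some 1, none, some 9, none, some 21,
   none, some 15, none, some 3, none,
   some 19, none, none, none, some 7,
   none, some 23, none, some 11, none,
   some 5, none, some 17, none, some 25,
   none]

-- mtx[i][j]; the literal indices are in range on Pre_, default 0 stands for the raise outside it
def ent (mtx : List (List Int)) (i j : Nat) : Int := (mtx.getD i []).getD j 0

-- ===== PORT A =====
def matrix3Inv (mtx : List (List Int)) : List (List Int) :=
  let A := ent mtx 1 1 * ent mtx 2 2 - ent mtx 2 1 * ent mtx 1 2
  let B := -(ent mtx 1 0 * ent mtx 2 2 - ent mtx 1 2 * ent mtx 2 0)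
  let C := ent mtx 1 0 * ent mtx 2 1 - ent mtx 1 1 * ent mtx 2 0
  let D := -(ent mtx 0 1 * ent mtx 2 2 - ent mtx 2 1 * ent mtx 0 2)
  let E := ent mtx 0 0 * ent mtx 2 2 - ent mtx 0 2 * ent mtx 2 0
  let F := -(ent mtx 0 0 * ent mtx 2 1 - ent mtx 0 1 * ent mtx 2 0)
  let G := ent mtx 0 1 * ent mtx 1 2 - ent mtx 1 1 * ent mtx 0 2
  let H := -(ent mtx 0 0 * ent mtx 1 2 - ent mtx 0 2 * ent mtx 1 0)
  let I := ent mtx 0 0 * ent mtx 1 1 - ent mtx 0 1 * ent mtx 1 0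
  let det := PySem.Int.mod (A * ent mtx 0 0 + B * ent mtx 0 1 + C * ent mtx 0 2) 26
  let detrepM26 := ((PySem.List.pyGet? z26Inverse (det - 1)).getD none).getD 0
  let inv := [[A, D, G], [B, E, H], [C, F, I]]
  inv.map (fun row => row.map (fun x => PySem.Int.mod (x * detrepM26) 26))

-- ===== PORT B =====
def matrix3Inv_alt (mtx : List (List Int)) : List (List Int) :=
  let M := (List.range 3).map (fun i => (List.range 3).map (fun j => ent mtx i j))
  let M2 := (List.range 3).map (fun i => (List.range 3).map (fun j =>
    ((List.range 3).map (fun k => ent M i k * ent M k j)).sum))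
  let t := ent M 0 0 + ent M 1 1 + ent M 2 2
  let t2 := ent M2 0 0 + ent M2 1 1 + ent M2 2 2
  let e2 := PySem.Int.floordiv (t * t - t2) 2
  let adj := (List.range 3).map (fun i => (List.range 3).map (fun j =>
    ent M2 i j - t * ent M i j + (if i = j then e2 else 0)))
  let det := PySem.Int.mod (((List.range 3).map (fun j => ent M 0 j * ent adj j 0)).sum) 26
  let d := ((PySem.List.pyGet? z26Inverse (det - 1)).getD none).getD 0
  (List.range 3).map (fun i => (List.range 3).map (fun j => PySem.Int.mod (ent adj i j * d) 26))

-- ===== PRECONDITION & SPEC =====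
-- determinant of the top-left 3x3 block, as a plain formula on the entries
def det3 (mtx : List (List Int)) : Int :=
  ent mtx 0 0 * (ent mtx 1 1 * ent mtx 2 2 - ent mtx 1 2 * ent mtx 2 1)
  - ent mtx 0 1 * (ent mtx 1 0 * ent mtx 2 2 - ent mtx 1 2 * ent mtx 2 0)
  + ent mtx 0 2 * (ent mtx 1 0 * ent mtx 2 1 - ent mtx 1 1 * ent mtx 2 0)

-- Pre_ excludes exactly the inputs on which A raises: matrices without a 3x3 top-left block
-- (IndexError) and matrices whose determinant is not invertible mod 26 (TypeError from the table).
def Pre_matrix3Inv (mtx : List (List Int)) : Prop :=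
  3 ≤ mtx.length ∧ (∀ r ∈ mtx.take 3, 3 ≤ r.length) ∧ Int.gcd (det3 mtx) 26 = 1
instance (mtx : List (List Int)) : Decidable (Pre_matrix3Inv mtx) := by unfold Pre_matrix3Inv; infer_instance

def pvWitness_matrix3Inv : List (List Int) := [[1, 0, 0], [0, 1, 0], [0, 0, 1]]

def Spec_matrix3Inv (mtx : List (List Int)) (out : List (List Int)) : Prop := out = matrix3Inv_alt mtx
instance (mtx : List (List Int)) (out : List (List Int)) : Decidable (Spec_matrix3Inv mtx out) := by unfold Spec_matrix3Inv; infer_instance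

-- ===== CLAIM (what is proved, stated in full; the proofs are below) =====
def Claim_equal_matrix3Inv : Prop := ∀ (mtx : List (List Int)), Dom_matrix3Inv mtx → Pre_matrix3Inv mtx → Spec_matrix3Inv mtx (matrix3Inv mtx)

theorem half_trace_sq (a b c d e f g h i : Int) :
    PySem.Int.floordiv ((a + e + i) * (a + e + i)
      - (a*a + (b*d + c*g) + (d*b + (e*e + f*h)) + (g*c + (h*f + i*i)))) 2
    = a*e + a*i + e*i - b*d - c*g - f*h := by
  have h2 : (a + e + i) * (a + e + i)
      - (a*a + (b*d + c*g) + (d*b + (e*e + f*h)) + (g*c + (h*f + i*i)))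
      = 2 * (a*e + a*i + e*i - b*d - c*g - f*h) := by ring
  rw [h2, PySem.Int.floordiv_eq_ediv_of_pos (by norm_num)]
  omega

set_option maxHeartbeats 2000000 in
theorem matrix3Inv_spec : Claim_equal_matrix3Inv := by
  intro mtx _ _
  show matrix3Inv mtx = matrix3Inv_alt mtx
  simp only [matrix3Inv, matrix3Inv_alt, List.range_succ, List.range_zero,
    List.nil_append, List.cons_append, List.map_cons, List.map_nil,
    List.sum_cons, List.sum_nil, add_zero, ent, List.getD_cons_zero, List.getD_cons_succ,
    reduceIte, Nat.reduceEqDiff]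
  rw [half_trace_sq]
  ring_nf
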